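-- pv_equiv track=rewrite | github.com/ForeignGods/ComfyUI-Mana-Nodes | nodes/speech2text_node.py | group_timestamps_into_words
-- ===== SOURCE A (Python) =====
-- def group_timestamps_into_words(filtered_timestamps):
--     words = []
--     current_word = []
--     for token, time in filtered_timestamps:
--         if token == '|':
--             if current_word:
--                 start_time = current_word[0][1]
--                 end_time = current_word[-1][1]
--                 word_string = ''.join([t[0] for t in current_word])  # Concatenate tokens into a single string
--                 words.append((word_string, start_time, end_time))
--                 current_word = []
--         else:
--             current_word.append((token, time))
--
--     # Check if there are remaining tokens in the last word
--     if current_word: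
--         start_time = current_word[0][1]
--         end_time = current_word[-1][1]
--         word_string = ''.join([t[0] for t in current_word])  # Concatenate tokens into a single string
--         words.append((word_string, start_time, end_time))
--
--     return words
-- ===== SOURCE B (Python) =====
-- def group_timestamps_into_words(filtered_timestamps):
--     # Run-splitting scan: for each maximal '|'-free run, emit one word tuple directly.
--     words = []
--     i, n = 0, len(filtered_timestamps)
--     while i < n:
--         if filtered_timestamps[i][0] == '|':
--             i += 1
--             continue
--         j = i
--         while j < n and filtered_timestamps[j][0] != '|':
--             j += 1
--         run = filtered_timestamps[i:j]
--         words.append((''.join(t for t, _ in run), run[0][1], run[-1][1]))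
--         i = j
--     return words
-- ===== Notes on version B (the rewrite author's own statement) =====
-- stated objective: alternative
-- what changed: Replaces the accumulator-plus-end-of-loop-flush with an index scan that finds each maximal non-'|' run and emits its word tuple directly, removing the duplicated flush code.
import Mathlib
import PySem

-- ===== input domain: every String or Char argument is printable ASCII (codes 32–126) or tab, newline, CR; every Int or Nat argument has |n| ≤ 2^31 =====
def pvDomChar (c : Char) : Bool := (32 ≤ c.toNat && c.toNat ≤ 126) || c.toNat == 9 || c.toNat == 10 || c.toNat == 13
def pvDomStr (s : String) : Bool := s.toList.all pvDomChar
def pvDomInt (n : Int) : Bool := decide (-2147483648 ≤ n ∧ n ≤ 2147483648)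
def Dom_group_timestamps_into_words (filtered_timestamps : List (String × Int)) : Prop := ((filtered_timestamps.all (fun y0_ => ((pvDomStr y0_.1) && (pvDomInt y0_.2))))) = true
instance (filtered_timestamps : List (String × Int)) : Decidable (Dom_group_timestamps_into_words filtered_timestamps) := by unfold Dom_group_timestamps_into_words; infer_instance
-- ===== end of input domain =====

-- B replaces A's accumulator-plus-flush loop with a run-splitting scan over maximal non-'|' runs (alternative decomposition, same cost).


-- ===== PORT A =====
-- A's flush: current_word[0][1], current_word[-1][1], ''.join of the tokens
-- (only called when current_word is nonempty, so headD/getLastD defaults are never used).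
def emitA (cw : List (String × Int)) : String × Int × Int :=
  (String.join (cw.map (·.1)), (cw.headD ("", 0)).2, (cw.getLastD ("", 0)).2)

def group_timestamps_into_words (filtered_timestamps : List (String × Int)) : List (String × Int × Int) :=
  let st := filtered_timestamps.foldl
    (fun (st : List (String × Int × Int) × List (String × Int)) p =>
      if p.1 == "|" then
        if st.2.isEmpty then st else (st.1 ++ [emitA st.2], [])
      else (st.1, st.2 ++ [p]))
    ([], [])
  if st.2.isEmpty then st.1 else st.1 ++ [emitA st.2]

-- ===== PORT B =====
-- B's emit for a run (run[0][1], run[-1][1], joined tokens); run is always nonempty.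
def emitB (run : List (String × Int)) : String × Int × Int :=
  (String.join (run.map (·.1)), (run.headD ("", 0)).2, (run.getLastD ("", 0)).2)

-- B's outer while loop: skip a separator, or take the maximal non-'|' run and emit it.
def altGo : List (String × Int) → List (String × Int × Int)
  | [] => []
  | p :: rest =>
    if p.1 == "|" then altGo rest
    else
      emitB (p :: rest.takeWhile (fun q => q.1 != "|")) ::
        altGo (rest.dropWhile (fun q => q.1 != "|"))
termination_by l => l.length
decreasing_by
  · simp
  · exact Nat.lt_succ_of_le (rest.length_dropWhile_le _)

def group_timestamps_into_words_alt (filtered_timestamps : List (String × Int)) : List (String × Int × Int) :=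
  altGo filtered_timestamps

-- ===== PRECONDITION & SPEC =====
def Spec_group_timestamps_into_words (filtered_timestamps : List (String × Int)) (out : List (String × Int × Int)) : Prop := out = group_timestamps_into_words_alt filtered_timestamps
instance (filtered_timestamps : List (String × Int)) (out : List (String × Int × Int)) : Decidable (Spec_group_timestamps_into_words filtered_timestamps out) := by unfold Spec_group_timestamps_into_words; infer_instance

-- ===== CLAIM (what is proved, stated in full; the proofs are below) =====
def Claim_equal_group_timestamps_into_words : Prop := ∀ (filtered_timestamps : List (String × Int)), Dom_group_timestamps_into_words filtered_timestamps → Spec_group_timestamps_into_words filtered_timestamps (group_timestamps_into_words filtered_timestamps)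

-- ===== LEMMAS AND PROOFS =====

-- what A's tail (loop continuation + final flush) produces, for arbitrary state
def finishA (words : List (String × Int × Int)) (cur : List (String × Int))
    (l : List (String × Int)) : List (String × Int × Int) :=
  let st := l.foldl
    (fun (st : List (String × Int × Int) × List (String × Int)) p =>
      if p.1 == "|" then
        if st.2.isEmpty then st else (st.1 ++ [emitA st.2], [])
      else (st.1, st.2 ++ [p]))
    (words, cur)
  if st.2.isEmpty then st.1 else st.1 ++ [emitA st.2]

-- what B produces given a pending '|'-free prefix `cur` followed by `l`
def wrapB (cur l : List (String × Int)) : List (String × Int × Int) :=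
  if cur.isEmpty then altGo l
  else emitB (cur ++ l.takeWhile (fun q => q.1 != "|")) ::
       altGo (l.dropWhile (fun q => q.1 != "|"))

theorem finishA_eq_wrapB (l : List (String × Int)) :
    ∀ (words : List (String × Int × Int)) (cur : List (String × Int)),
      finishA words cur l = words ++ wrapB cur l := by
  induction l with
  | nil =>
    intro words cur
    cases cur with
    | nil => simp [finishA, wrapB, altGo]
    | cons c cs => simp [finishA, wrapB, altGo, emitA, emitB]
  | cons p rest ih =>
    intro words cur
    by_cases hsep : p.1 = "|"
    · by_cases hcur : cur = []
      · have h1 : finishA words cur (p :: rest) = finishA words [] rest := by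
          simp [finishA, hsep, hcur]
        rw [h1, ih]
        simp [wrapB, altGo, hsep, hcur]
      · have h1 : finishA words cur (p :: rest) = finishA (words ++ [emitA cur]) [] rest := by
          simp [finishA, hsep, hcur]
        rw [h1, ih]
        simp [wrapB, altGo, hsep, hcur, emitA, emitB,
          List.append_assoc]
    · have h1 : finishA words cur (p :: rest) = finishA words (cur ++ [p]) rest := by
        simp [finishA, hsep]
      rw [h1, ih]
      by_cases hcur : cur = []
      · subst hcur
        simp [wrapB, altGo, hsep]
      · simp [wrapB, hsep, hcur, List.append_assoc]

-- ===== VERDICT (by name: the statement is the Claim_ definition above) =====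
theorem group_timestamps_into_words_spec : Claim_equal_group_timestamps_into_words := by
  intro fts _
  show group_timestamps_into_words fts = group_timestamps_into_words_alt fts
  have := finishA_eq_wrapB fts [] []
  simpa [finishA, wrapB, group_timestamps_into_words, group_timestamps_into_words_alt] using this
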